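-- pv_equiv track=rewrite | github.com/Zignov/FRI | SecondYear/Alogirtmi/GameSolverAi.py | intersect_patterns
-- ===== SOURCE A (Python) =====
-- UNKNOWN = -1
--
-- def intersect_patterns(patterns):
--     """
--     From a list of valid patterns, determine forced cells.
--     If all patterns agree at a position, return that value; else UNKNOWN.
--     """
--     if not patterns:
--         return None
--
--     length = len(patterns[0])
--     result = []
--     for i in range(length):
--         values = {p[i] for p in patterns}
--         if len(values) == 1:
--             result.append(values.pop())
--         else:
--             result.append(UNKNOWN)
--     return result
-- ===== SOURCE B (Python) =====
-- UNKNOWN = -1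
--
-- def intersect_patterns(patterns):
--     if not patterns:
--         return None
--     result = list(patterns[0])
--     for p in patterns[1:]:
--         result = [UNKNOWN if r != UNKNOWN and r != p[i] else r
--                   for i, r in enumerate(result)]
--     return result
-- ===== Notes on version B (the rewrite author's own statement) =====
-- stated objective: alternative
-- what changed: B folds the patterns left-to-right into a running consensus list seeded from patterns[0] (marking a position UNKNOWN at the first disagreement), instead of building a per-position set of all values and testing its size.
import Mathlib
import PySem

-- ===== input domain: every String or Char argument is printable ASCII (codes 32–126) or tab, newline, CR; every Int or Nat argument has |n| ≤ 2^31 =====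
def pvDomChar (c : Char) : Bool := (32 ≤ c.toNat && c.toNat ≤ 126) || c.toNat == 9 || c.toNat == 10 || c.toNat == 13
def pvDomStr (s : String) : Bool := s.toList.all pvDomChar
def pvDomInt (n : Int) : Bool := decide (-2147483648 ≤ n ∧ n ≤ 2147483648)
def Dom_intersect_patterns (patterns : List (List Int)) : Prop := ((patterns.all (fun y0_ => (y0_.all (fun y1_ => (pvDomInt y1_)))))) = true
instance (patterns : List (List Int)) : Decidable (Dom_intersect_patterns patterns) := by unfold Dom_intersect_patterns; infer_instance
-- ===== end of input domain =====

-- B replaces A's per-position set construction by a left fold of the patterns into a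
-- running consensus list (alternative decomposition, same asymptotic cost).

-- ===== PORT A =====
def intersect_patterns (patterns : List (List Int)) : Option (List Int) :=
  match patterns with
  | [] => none
  | p0 :: _ =>
      some ((PySem.List.pyRange 0 (p0.length : Int) 1).map (fun i =>
        let values : PySem.Set Int :=
          PySem.Set.ofList (patterns.map (fun p => PySem.List.pyGetD p i 0))
        if values.length = 1 then values.headD 0 else (-1 : Int)))

-- ===== PORT B =====
-- inner comprehension of Source B: one pass over enumerate(result)
def ipStep (p result : List Int) : List Int :=
  (PySem.List.enumerate result 0).map (fun ir =>
    if ir.2 ≠ -1 ∧ ir.2 ≠ PySem.List.pyGetD p ir.1 0 then (-1 : Int) else ir.2)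

def intersect_patterns_alt (patterns : List (List Int)) : Option (List Int) :=
  match patterns with
  | [] => none
  | p0 :: rest => some (rest.foldl (fun result p => ipStep p result) p0)

-- ===== PRECONDITION & SPEC =====
-- Pre_ excludes exactly the inputs where Python A raises IndexError: some pattern
-- shorter than patterns[0] (p[i] with i up to len(patterns[0]) - 1).
def Pre_intersect_patterns (patterns : List (List Int)) : Prop :=
  ∀ p ∈ patterns, (patterns.headD []).length ≤ p.length
instance (patterns : List (List Int)) : Decidable (Pre_intersect_patterns patterns) := by
  unfold Pre_intersect_patterns; infer_instance

def pvWitness_intersect_patterns : List (List Int) := [[1, 2], [1, 3]]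

def Spec_intersect_patterns (patterns : List (List Int)) (out : Option (List Int)) : Prop := out = intersect_patterns_alt patterns
instance (patterns : List (List Int)) (out : Option (List Int)) : Decidable (Spec_intersect_patterns patterns out) := by unfold Spec_intersect_patterns; infer_instance

-- ===== CLAIM (what is proved, stated in full; the proofs are below) =====
def Claim_equal_intersect_patterns : Prop := ∀ (patterns : List (List Int)), Dom_intersect_patterns patterns → Pre_intersect_patterns patterns → Spec_intersect_patterns patterns (intersect_patterns patterns)

-- ===== LEMMAS AND PROOFS =====

-- set(vals) of a list whose elements are all equal is the singleton
lemma ofList_all_eq (x : Int) (xs : List Int) (h : ∀ y ∈ xs, y = x) :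
    PySem.Set.ofList (x :: xs) = [x] := by
  have step : ∀ (ys : List Int), (∀ y ∈ ys, y = x) → ys.foldl PySem.Set.add [x] = [x] := by
    intro ys
    induction ys with
    | nil => intro _; rfl
    | cons y ys ih =>
        intro hy
        have hx : y = x := hy y (by simp)
        have : PySem.Set.add [x] y = [x] := by
          simp [PySem.Set.add, PySem.Set.contains, hx]
        simpa [List.foldl, this] using ih (fun z hz => hy z (by simp [hz]))
  calc PySem.Set.ofList (x :: xs) = (x :: xs).foldl PySem.Set.add [] := PySem.Set.ofList_eq_foldl _
    _ = xs.foldl PySem.Set.add [x] := by simp [List.foldl, PySem.Set.add, PySem.Set.contains]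
    _ = [x] := step xs h

-- a set built from a list with two distinct members cannot have length 1
lemma ofList_len_ne_one (x y : Int) (xs : List Int) (hy : y ∈ xs) (hne : y ≠ x) :
    (PySem.Set.ofList (x :: xs)).length ≠ 1 := by
  intro h1
  obtain ⟨a, ha⟩ : ∃ a, PySem.Set.ofList (x :: xs) = [a] := by
    cases hs : PySem.Set.ofList (x :: xs) with
    | nil => simp [hs] at h1
    | cons a t =>
        cases t with
        | nil => exact ⟨a, rfl⟩
        | cons b t' => simp [hs] at h1
  have hx : x ∈ PySem.Set.ofList (x :: xs) := (PySem.Set.mem_ofList _ _).2 (by simp)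
  have hy' : y ∈ PySem.Set.ofList (x :: xs) := (PySem.Set.mem_ofList _ _).2 (by simp [hy])
  rw [ha] at hx hy'
  simp at hx hy'
  exact hne (hy'.trans hx.symm)

-- elementwise value of the enumerate-comprehension
lemma enumMap_get (f : Int → Int → Int) :
    ∀ (xs : List Int) (s : Int) (k : Nat) (hk : k < xs.length),
      ((PySem.List.enumerate xs s).map (fun ir => f ir.1 ir.2))[k]'(by
        simpa [PySem.List.length_enumerate] using hk) = f (s + k) xs[k] := by
  intro xs
  induction xs with
  | nil => intro s k hk; simp at hk
  | cons x t ih =>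
      intro s k hk
      cases k with
      | zero => simp [PySem.List.enumerate_cons]
      | succ k =>
          have hk' : k < t.length := by simpa using hk
          have := ih (s + 1) k hk'
          simpa [PySem.List.enumerate_cons, add_assoc, add_comm, add_left_comm,
            Nat.cast_succ] using this

lemma ipStep_length (p acc : List Int) : (ipStep p acc).length = acc.length := by
  simp [ipStep, PySem.List.length_enumerate]

lemma ipStep_get (p acc : List Int) (k : Nat) (hk : k < acc.length) :
    (ipStep p acc)[k]'(by simpa [ipStep_length] using hk) =
      if acc[k] ≠ -1 ∧ acc[k] ≠ PySem.List.pyGetD p (k : Int) 0 then -1 else acc[k] := by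
  have := enumMap_get
    (fun i r => if r ≠ -1 ∧ r ≠ PySem.List.pyGetD p i 0 then (-1 : Int) else r) acc 0 k hk
  simpa [ipStep] using this

lemma fold_length (rest : List (List Int)) :
    ∀ (acc : List Int), (rest.foldl (fun r p => ipStep p r) acc).length = acc.length := by
  induction rest with
  | nil => intro acc; rfl
  | cons p ps ih => intro acc; simpa [ipStep_length] using ih (ipStep p acc)

lemma fold_get (rest : List (List Int)) :
    ∀ (acc : List Int) (k : Nat) (hk : k < acc.length),
      (rest.foldl (fun r p => ipStep p r) acc)[k]'(by simpa [fold_length] using hk) =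
        if acc[k] ≠ -1 ∧ ∀ p ∈ rest, PySem.List.pyGetD p (k : Int) 0 = acc[k]
        then acc[k] else -1 := by
  induction rest with
  | nil =>
      intro acc k hk
      by_cases h : acc[k] = -1 <;> simp [h]
  | cons p ps ih =>
      intro acc k hk
      have hk' : k < (ipStep p acc).length := by simpa [ipStep_length] using hk
      have hstep := ipStep_get p acc k hk
      have := ih (ipStep p acc) k hk'
      simp only [List.foldl_cons]
      rw [this, hstep]
      by_cases ha : acc[k] = -1
      · simp [ha]
      · by_cases hp : p[k]?.getD 0 = acc[k]
        · simp [ha, hp]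
        · have hp' : ¬(acc[k] = p[k]?.getD 0) := fun h => hp h.symm
          simp [ha, hp, hp']

-- ===== VERDICT (by name: the statement is the Claim_ definition above) =====
theorem intersect_patterns_spec : Claim_equal_intersect_patterns := by
  intro patterns _ _
  unfold Spec_intersect_patterns
  cases patterns with
  | nil => rfl
  | cons p0 rest =>
      simp only [intersect_patterns, intersect_patterns_alt]
      congr 1
      apply List.ext_getElem
      · simp [fold_length, PySem.List.length_pyRange_one]
      · intro k hk1 hk2
        have hk : k < p0.length := by
          simpa [PySem.List.length_pyRange_one] using hk1
        have hB := fold_get rest p0 k hk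
        rw [List.getElem_map]
        rw [PySem.List.getElem_pyRange_one]
        rw [zero_add]
        have hp0 : PySem.List.pyGetD p0 (k : Int) 0 = p0[k] := by
          simp [PySem.List.pyGetD_natCast, List.getElem?_eq_getElem hk]
        by_cases hall : ∀ p ∈ rest, PySem.List.pyGetD p (k : Int) 0 = p0[k]
        · have hset : PySem.Set.ofList ((p0 :: rest).map (fun p => PySem.List.pyGetD p (k : Int) 0))
              = [p0[k]] := by
            rw [List.map_cons, hp0]
            exact ofList_all_eq _ _ (by
              intro y hy
              obtain ⟨p, hp, rfl⟩ := List.mem_map.1 hy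
              exact hall p hp)
          have hset' : PySem.Set.ofList (p0[k]?.getD 0 :: rest.map (fun p => p[k]?.getD 0))
              = [p0[k]] := by simpa using hset
          have hall' : ∀ p ∈ rest, p[k]?.getD 0 = p0[k] := by simpa using hall
          rw [hB]
          by_cases hm : p0[k] = -1
          · simp [hset', hm]
          · simp [hset', hm]
            exact hall'
        · push Not at hall
          obtain ⟨p, hpmem, hpne⟩ := hall
          have hset := ofList_len_ne_one (p0[k]) (PySem.List.pyGetD p (k : Int) 0)
            (rest.map (fun q => PySem.List.pyGetD q (k : Int) 0))
            (List.mem_map.2 ⟨p, hpmem, rfl⟩) hpne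
          have hset' : (PySem.Set.ofList (p0[k] :: rest.map (fun q => q[k]?.getD 0))).length ≠ 1 := by
            simpa [hp0] using hset
          have hcond : ¬ (p0[k] ≠ -1 ∧ ∀ q ∈ rest, PySem.List.pyGetD q (k : Int) 0 = p0[k]) := by
            rintro ⟨-, hq⟩; exact hpne (hq p hpmem)
          rw [hB]
          simp only [hcond, if_false]
          simp [List.getElem?_eq_getElem hk, hset']
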